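-- pv_equiv track=rewrite | github.com/CINPLA/expipe-cinpla-legacy | expipe-plugin-cinpla/expipe_plugin_cinpla/visual_tools.py | _find_identical_trialing_elements
-- ===== SOURCE A (Python) =====
-- def _find_identical_trialing_elements(values):
--     # TODO: check tests
--     '''
--     Finds indices of the first elements when there are two or more
--     trialing elements with the same value
--
--     Parameters
--     ----------
--     values : array_like
--         event values
--
--     Returns
--     -------
--     ids : list
--              list of indices
--     '''
--     ids = []
--     value_id = 0
--     samples_count = len(values)
--     while value_id < samples_count - 1:
--         current_id = value_id
--         current_value = values[value_id]
--         rep_count = 1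
--         next_id = value_id + 1
--         for i in range(next_id, samples_count):
--             if values[i] == current_value:
--                 rep_count += 1
--             else:
--                 value_id = i
--                 break
--         if len(ids) != 0 and ids[-1] == current_id:
--                 break
--         if rep_count > 1:
--             ids.append(current_id)
--     return ids
-- ===== SOURCE B (Python) =====
-- def _find_identical_trialing_elements(values):
--     n = len(values)
--     if n == 0:
--         return []
--     bounds = [0] + [i for i in range(1, n) if values[i] != values[i - 1]] + [n]
--     return [a for a, b in zip(bounds, bounds[1:]) if b - a > 1]
-- ===== Notes on version B (the rewrite author's own statement) =====
-- stated objective: alternative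
-- what changed: Replaces the while-loop with an inner anchored scan, break and last-appended guard by two passes: first build the table of run-boundary indices (0, the consecutive-change positions, n), then emit the left end of every consecutive boundary pair whose gap exceeds 1.
import Mathlib
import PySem

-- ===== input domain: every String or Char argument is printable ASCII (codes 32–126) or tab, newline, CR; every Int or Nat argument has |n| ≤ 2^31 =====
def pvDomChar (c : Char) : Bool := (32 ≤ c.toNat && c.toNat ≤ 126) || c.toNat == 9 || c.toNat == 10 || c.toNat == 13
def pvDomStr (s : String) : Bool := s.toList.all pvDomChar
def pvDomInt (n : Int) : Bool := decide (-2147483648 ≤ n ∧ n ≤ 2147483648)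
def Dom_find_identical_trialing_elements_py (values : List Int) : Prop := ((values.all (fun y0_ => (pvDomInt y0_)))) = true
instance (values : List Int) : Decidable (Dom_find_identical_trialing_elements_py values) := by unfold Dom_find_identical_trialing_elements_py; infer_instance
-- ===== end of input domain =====

-- B rebuilds the result in two passes (boundary table of run changes, then a scan over
-- consecutive boundary pairs) instead of A's while-loop with an anchored inner scan and break.

-- ===== PORT A =====
-- the inner `for i in range(next_id, samples_count)` loop: returns (rep_count, value_id, broke)
def innerA (values : List Int) (cv : Int) : List Int → Int → Int → Int × Int × Bool
  | [], rep, vid => (rep, vid, false)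
  | i :: rest, rep, vid =>
    if PySem.List.pyGetD values i 0 = cv then innerA values cv rest (rep + 1) vid
    else (rep, i, true)

-- the outer while loop; fuel (length+1) provably suffices for Python's loop
def loopA (values : List Int) : Nat → Int → List Int → List Int
  | 0, _, ids => ids
  | fuel + 1, value_id, ids =>
    if value_id < (values.length : Int) - 1 then
      let current_value := PySem.List.pyGetD values value_id 0
      let r := innerA values current_value
        (PySem.List.pyRange (value_id + 1) (values.length : Int)) 1 value_id
      if ids ≠ [] ∧ ids.getLast? = some value_id then ids
      else loopA values fuel r.2.1 (if r.1 > 1 then ids ++ [value_id] else ids)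
    else ids

def find_identical_trialing_elements_py (values : List Int) : List Int :=
  loopA values (values.length + 1) 0 []

-- ===== PORT B =====
def chgB (values : List Int) (i : Int) : Bool :=
  PySem.List.pyGetD values i 0 != PySem.List.pyGetD values (i - 1) 0

def find_identical_trialing_elements_py_alt (values : List Int) : List Int :=
  let n : Int := values.length
  if n = 0 then []
  else
    let bounds := [(0 : Int)] ++ (PySem.List.pyRange 1 n).filter (chgB values) ++ [n]
    ((bounds.zip (bounds.drop 1)).filter (fun q => decide (q.2 - q.1 > 1))).map Prod.fst

-- ===== PRECONDITION & SPEC =====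
def Spec_find_identical_trialing_elements_py (values : List Int) (out : List Int) : Prop := out = find_identical_trialing_elements_py_alt values
instance (values : List Int) (out : List Int) : Decidable (Spec_find_identical_trialing_elements_py values out) := by unfold Spec_find_identical_trialing_elements_py; infer_instance

-- ===== CLAIM (what is proved, stated in full; the proofs are below) =====
def Claim_equal_find_identical_trialing_elements_py : Prop := ∀ (values : List Int), Dom_find_identical_trialing_elements_py values → Spec_find_identical_trialing_elements_py values (find_identical_trialing_elements_py values)

-- ===== LEMMAS AND PROOFS =====

-- B's second pass, as a helper for the proofs
def pairsOut (l : List Int) : List Int :=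
  ((l.zip (l.drop 1)).filter (fun q => decide (q.2 - q.1 > 1))).map Prod.fst

-- one-step unfolding of A's while loop
theorem loopA_succ (values : List Int) (fuel : Nat) (value_id : Int) (ids : List Int) :
    loopA values (fuel + 1) value_id ids =
      if value_id < (values.length : Int) - 1 then
        if ids ≠ [] ∧ ids.getLast? = some value_id then ids
        else
          loopA values fuel
            (innerA values (PySem.List.pyGetD values value_id 0)
              (PySem.List.pyRange (value_id + 1) (values.length : Int)) 1 value_id).2.1
            (if (innerA values (PySem.List.pyGetD values value_id 0)
                  (PySem.List.pyRange (value_id + 1) (values.length : Int)) 1 value_id).1 > 1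
             then ids ++ [value_id] else ids)
      else ids := rfl

theorem pyRange_empty {a n : Int} (h : n ≤ a) : PySem.List.pyRange a n = [] := by
  rw [PySem.List.pyRange_one]
  simp [Int.toNat_of_nonpos (by omega : n - a ≤ 0)]

theorem pairsOut_cons₂ (a b : Int) (l : List Int) :
    pairsOut (a :: b :: l) = (if b - a > 1 then [a] else []) ++ pairsOut (b :: l) := by
  simp only [pairsOut, List.drop_succ_cons, List.drop_zero, List.zip_cons_cons, List.filter_cons]
  split_ifs with h₁ h₂ h₂ <;> simp_all

theorem pairsOut_pair (a b : Int) :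
    pairsOut [a, b] = if b - a > 1 then [a] else [] := by
  simp only [pairsOut]
  split_ifs with h <;> simp_all

-- no consecutive change on (v, j) ⇒ the segment [v, j) is constant
theorem run_const (values : List Int) (v j : Int)
    (hno : ∀ t, v < t → t < j → chgB values t = false) :
    ∀ i, v ≤ i → i < j → PySem.List.pyGetD values i 0 = PySem.List.pyGetD values v 0 := by
  intro i h1 h2
  obtain ⟨k, hk⟩ : ∃ k : Nat, i - v = (k : Int) := ⟨(i - v).toNat, by omega⟩
  induction k generalizing i with
  | zero =>
    have h : i = v := by omega
    rw [h]
  | succ m ih =>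
    have hv : v < i := by omega
    have hc := hno i hv h2
    simp only [chgB, bne_eq_false_iff_eq] at hc
    rw [hc]
    exact ih (i - 1) (by omega) (by omega) (by omega)

-- the inner scan: finds the first index j ∈ [a, n) whose value differs from cv (or runs out)
theorem inner_spec (values : List Int) (cv : Int) (n j : Int) :
    ∀ a rep vid, a ≤ j → j ≤ n →
    (∀ i, a ≤ i → i < j → PySem.List.pyGetD values i 0 = cv) →
    (j = n ∨ PySem.List.pyGetD values j 0 ≠ cv) →
    innerA values cv (PySem.List.pyRange a n) rep vid =
      if j = n then (rep + (n - a), vid, false) else (rep + (j - a), j, true) := by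
  intro a rep vid haj hjn hconst hend
  obtain ⟨k, hk⟩ : ∃ k : Nat, n - a = (k : Int) ∨ n - a ≤ 0 ∧ k = 0 :=
    ⟨(n - a).toNat, by omega⟩
  induction k generalizing a rep with
  | zero =>
    have hjn' : j = n := by omega
    rw [pyRange_empty (by omega), if_pos hjn']
    simp only [innerA]
    have e : rep + (n - a) = rep := by omega
    rw [e]
  | succ m ih =>
    have han : a < n := by omega
    rw [PySem.List.pyRange_one_cons han]
    by_cases haj' : a < j
    · have ha : PySem.List.pyGetD values a 0 = cv := hconst a le_rfl haj'
      simp only [innerA, ha]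
      rw [ih (a + 1) (rep + 1) (by omega) (fun i h1 h2 => hconst i (by omega) h2) (by omega)]
      by_cases h : j = n
      · rw [if_pos h, if_pos h]
        have e : rep + 1 + (n - (a + 1)) = rep + (n - a) := by ring
        rw [e]
        simp
      · rw [if_neg h, if_neg h]
        have e : rep + 1 + (j - (a + 1)) = rep + (j - a) := by ring
        rw [e]
        simp
    · have haj'' : a = j := by omega
      have hne : PySem.List.pyGetD values a 0 ≠ cv := by
        rcases hend with h | h
        · omega
        · rw [haj'']; exact h
      simp only [innerA]
      rw [if_neg hne, if_neg (show ¬ j = n by omega), haj'']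
      simp

-- find? on an increasing range is the minimal hit
theorem find?_pyRange_min (p : Int → Bool) (n : Int) :
    ∀ a j, (PySem.List.pyRange a n).find? p = some j →
      ∀ t, a ≤ t → t < j → p t = false := by
  intro a j hfind
  obtain ⟨k, hk⟩ : ∃ k : Nat, n - a = (k : Int) ∨ n - a ≤ 0 ∧ k = 0 :=
    ⟨(n - a).toNat, by omega⟩
  induction k generalizing a with
  | zero =>
    rw [pyRange_empty (by omega)] at hfind
    simp at hfind
  | succ m ih =>
    have han : a < n := by omega
    rw [PySem.List.pyRange_one_cons han] at hfind
    intro t h1 h2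
    by_cases hpa : p a = true
    · simp only [List.find?_cons, hpa] at hfind
      have : a = j := by simpa using hfind
      exact absurd h2 (by omega)
    · simp [hpa] at hfind
      by_cases hta : t = a
      · subst hta; simpa using hpa
      · exact ih (a + 1) hfind (by omega) t (by omega) h2

-- filter over an increasing range, split at the first hit
theorem filter_pyRange_split (p : Int → Bool) (n : Int) :
    ∀ a j, a ≤ j → j < n → p j = true → (∀ t, a ≤ t → t < j → p t = false) →
    (PySem.List.pyRange a n).filter p = j :: (PySem.List.pyRange (j + 1) n).filter p := by
  intro a j haj hjn hpj hno
  obtain ⟨k, hk⟩ : ∃ k : Nat, j - a = (k : Int) := ⟨(j - a).toNat, by omega⟩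
  induction k generalizing a with
  | zero =>
    have h : a = j := by omega
    subst h
    rw [PySem.List.pyRange_one_cons hjn, List.filter_cons, if_pos (by simp [hpj])]
  | succ m ih =>
    have han : a < n := by omega
    rw [PySem.List.pyRange_one_cons han, List.filter_cons,
      if_neg (by simp [hno a le_rfl (by omega)])]
    exact ih (a + 1) (by omega) (fun t h1 h2 => hno t (by omega) h2) (by omega)

-- the main invariant of A's while loop
theorem loopA_spec (values : List Int) :
    ∀ fuel v ids, ((values.length : Int) - v).toNat ≤ fuel + 1 →
    0 ≤ v → v < (values.length : Int) - 1 → (∀ x ∈ ids, x < v) →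
    loopA values (fuel + 1) v ids =
      ids ++ pairsOut (v :: ((PySem.List.pyRange (v + 1) (values.length : Int)).filter (chgB values) ++ [(values.length : Int)])) := by
  intro fuel
  induction fuel with
  | zero => intro v ids hfuel h0 hv hids; omega
  | succ f ih =>
    intro v ids hfuel h0 hv hids
    have hbreak : ¬ (ids ≠ [] ∧ ids.getLast? = some v) := by
      rintro ⟨hne, hlast⟩
      have : v ∈ ids := List.mem_of_getLast? hlast
      exact absurd (hids v this) (by omega)
    rcases hfind : (PySem.List.pyRange (v + 1) (values.length : Int)).find? (chgB values)
      with _ | j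
    · -- no further change: the run extends to the end of the list
      have hnone := List.find?_eq_none.mp hfind
      have hnochg : ∀ t, v < t → t < (values.length : Int) → chgB values t = false := by
        intro t h1 h2
        by_contra h
        exact hnone t (PySem.List.mem_pyRange_one.mpr ⟨by omega, h2⟩) (by simpa using h)
      have hconst := run_const values v (values.length : Int) hnochg
      have hfil : (PySem.List.pyRange (v + 1) (values.length : Int)).filter (chgB values) = [] := by
        rw [List.filter_eq_nil_iff]
        intro t ht
        have := PySem.List.mem_pyRange_one.mp ht
        simp [hnochg t (by omega) (by omega)]
      have hinner := inner_spec values (PySem.List.pyGetD values v 0) (values.length : Int)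
        (values.length : Int) (v + 1) 1 v (by omega) le_rfl
        (fun i h1 h2 => hconst i (by omega) h2) (Or.inl rfl)
      rw [if_pos rfl] at hinner
      rw [loopA_succ, if_pos hv, if_neg hbreak, hinner]
      dsimp only
      rw [if_pos (show (1 : Int) + ((values.length : Int) - (v + 1)) > 1 by omega)]
      -- one more iteration, which hits the `ids[-1] == current_id` break
      rw [loopA_succ, if_pos hv]
      rw [if_pos (⟨by simp, List.getLast?_concat⟩ :
        ids ++ [v] ≠ [] ∧ (ids ++ [v]).getLast? = some v)]
      rw [hfil, List.nil_append, pairsOut_pair,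
        if_pos (show (values.length : Int) - v > 1 by omega)]
    · -- the first change is at index j
      have hpj := List.find?_some hfind
      have hjmem := PySem.List.mem_pyRange_one.mp (List.mem_of_find?_eq_some hfind)
      have hmin := find?_pyRange_min (chgB values) (values.length : Int) (v + 1) j hfind
      have hnochg : ∀ t, v < t → t < j → chgB values t = false :=
        fun t h1 h2 => hmin t (by omega) h2
      have hconst := run_const values v j hnochg
      have hjne : PySem.List.pyGetD values j 0 ≠ PySem.List.pyGetD values v 0 := by
        have hj1 : PySem.List.pyGetD values (j - 1) 0 = PySem.List.pyGetD values v 0 :=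
          hconst (j - 1) (by omega) (by omega)
        simp only [chgB, bne_iff_ne, ne_eq] at hpj
        rw [← hj1]; exact hpj
      have hinner := inner_spec values (PySem.List.pyGetD values v 0) (values.length : Int) j
        (v + 1) 1 v (by omega) (by omega) (fun i h1 h2 => hconst i (by omega) h2) (Or.inr hjne)
      rw [if_neg (show ¬ j = (values.length : Int) by omega)] at hinner
      rw [loopA_succ, if_pos hv, if_neg hbreak, hinner]
      dsimp only
      rw [filter_pyRange_split (chgB values) (values.length : Int) (v + 1) j (by omega)
        (by omega) hpj (fun t h1 h2 => hmin t h1 h2), List.cons_append, pairsOut_cons₂]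
      by_cases hjlt : j < (values.length : Int) - 1
      · rw [ih j (if 1 + (j - (v + 1)) > 1 then ids ++ [v] else ids) (by omega) (by omega) hjlt
          (by intro x hx
              split_ifs at hx with h
              · rcases List.mem_append.mp hx with h' | h'
                · have := hids x h'; omega
                · simp at h'; omega
              · have := hids x hx; omega)]
        by_cases hc : j - v > 1
        · rw [if_pos (by omega : (1:Int) + (j - (v + 1)) > 1), if_pos hc]
          simp
        · rw [if_neg (by omega : ¬ (1:Int) + (j - (v + 1)) > 1), if_neg hc]
          simp
      · -- j = length - 1: the next loop iteration exits the while loop immediately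
        rw [loopA_succ, if_neg hjlt]
        rw [pyRange_empty (by omega : (values.length : Int) ≤ j + 1), List.filter_nil,
          List.nil_append, pairsOut_pair,
          if_neg (show ¬ (values.length : Int) - j > 1 by omega)]
        by_cases hc : j - v > 1
        · rw [if_pos (by omega : (1:Int) + (j - (v + 1)) > 1), if_pos hc]
          simp
        · rw [if_neg (by omega : ¬ (1:Int) + (j - (v + 1)) > 1), if_neg hc]
          simp

-- ===== VERDICT (by name: the statement is the Claim_ definition above) =====
theorem find_identical_trialing_elements_py_spec : Claim_equal_find_identical_trialing_elements_py := by
  intro values _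
  unfold Spec_find_identical_trialing_elements_py find_identical_trialing_elements_py
    find_identical_trialing_elements_py_alt
  by_cases h0 : values.length = 0
  · rw [if_pos (show ((values.length : Int)) = 0 by omega), loopA_succ,
      if_neg (show ¬ (0 : Int) < (values.length : Int) - 1 by omega)]
  · rw [if_neg (show ¬ ((values.length : Int)) = 0 by omega)]
    by_cases h1 : values.length = 1
    · rw [loopA_succ, if_neg (show ¬ (0 : Int) < (values.length : Int) - 1 by omega)]
      rw [pyRange_empty (show (values.length : Int) ≤ 1 by omega)]
      show ([] : List Int) = pairsOut [0, (values.length : Int)]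
      rw [pairsOut_pair, if_neg (show ¬ (values.length : Int) - 0 > 1 by omega)]
    · rw [loopA_spec values values.length 0 [] (by omega) le_rfl (by omega) (by simp),
        List.nil_append]
      rfl
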